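-- pv_equiv track=rewrite | github.com/kdfwow64/Django-Chatbot | features/text_processing.py | get_partial_match
-- ===== SOURCE A (Python) =====
-- def ngram(n, l):
--   out = []
--   for i in range(len(l)-n+1):
--     temp_string = " ".join(l[i:i+n])
--     out.append(temp_string)
--   return out
--
-- def get_partial_match(wl, l2m):
--   """take in a list of strings, and another list called l2m,
--   and returns the list of strings in l2m that are found in wl."""
--   n = len(wl)
--   match_list = []
--   for C in range(n, 0, -1):
--     grams = ngram(C, wl)
--     for i in l2m:
--       if i in grams:
--         match_list.append(i)
--   return match_list
-- ===== SOURCE B (Python) =====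
-- def get_partial_match(wl, l2m):
--     """take in a list of strings, and another list called l2m,
--     and returns the list of strings in l2m that are found in wl."""
--     n = len(wl)
--     lengths = {}
--     for C in range(1, n + 1):
--         for g in set(" ".join(wl[i:i + C]) for i in range(n - C + 1)):
--             lengths.setdefault(g, []).append(C)
--     items = [(-C, pos) for pos, s in enumerate(l2m) for C in lengths.get(s, [])]
--     items.sort()
--     return [l2m[pos] for _, pos in items]
-- ===== Notes on version B (the rewrite author's own statement) =====
-- stated objective: faster
-- what changed: A rebuilds the full gram list for every length C and scans it linearly for each l2m entry; B builds a single hash index mapping each gram string to the list of lengths at which it occurs, emits one (-length, position) item per match while walking l2m once, and recovers A's longest-first / l2m-stable order by one sort.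
import Mathlib
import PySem

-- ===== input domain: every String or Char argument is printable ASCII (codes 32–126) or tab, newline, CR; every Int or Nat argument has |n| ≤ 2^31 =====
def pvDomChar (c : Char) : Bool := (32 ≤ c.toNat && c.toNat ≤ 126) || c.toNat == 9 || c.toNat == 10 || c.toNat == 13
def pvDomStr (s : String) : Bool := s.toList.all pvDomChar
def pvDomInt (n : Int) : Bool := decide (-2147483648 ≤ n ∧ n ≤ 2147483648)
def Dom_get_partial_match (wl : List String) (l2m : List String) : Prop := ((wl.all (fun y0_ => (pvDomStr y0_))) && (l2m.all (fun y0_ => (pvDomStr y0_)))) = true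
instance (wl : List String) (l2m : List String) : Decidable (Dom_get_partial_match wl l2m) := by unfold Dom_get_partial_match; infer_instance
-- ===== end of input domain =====

-- B replaces A's per-length gram-list rebuilds and linear membership scans by a gram→lengths
-- index built once plus a sort of the (−length, position) matches (objective: faster).

-- ===== PORT A =====
def ngram (n : Int) (l : List String) : List String :=
  (PySem.List.pyRange 0 ((l.length : Int) - n + 1) 1).foldl
    (fun out i => out ++ [PySem.Str.join " " (PySem.List.slice l (some i) (some (i + n)))]) []

def get_partial_match (wl : List String) (l2m : List String) : List String :=
  let n : Int := wl.length
  (PySem.List.pyRange n 0 (-1)).foldl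
    (fun match_list C =>
      let grams := ngram C wl
      l2m.foldl (fun ml i => if i ∈ grams then ml ++ [i] else ml) match_list)
    []

-- ===== PORT B =====
def get_partial_match_alt (wl : List String) (l2m : List String) : List String :=
  let n : Int := wl.length
  let lengths : PySem.Dict String (List Int) :=
    (PySem.List.pyRange 1 (n + 1) 1).foldl
      (fun d C =>
        (PySem.Set.ofList ((PySem.List.pyRange 0 (n - C + 1) 1).map
            (fun i => PySem.Str.join " " (PySem.List.slice wl (some i) (some (i + C)))))).foldl
          (fun d g => d.insert g (d.getD g [] ++ [C])) d)
      PySem.Dict.empty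
  let items : List (Int × Int) :=
    (PySem.List.enumerate l2m).flatMap
      (fun p => (lengths.getD p.2 []).map (fun C => (-C, p.1)))
  (PySem.List.sorted2 items (fun t => t.1) (fun t => t.2)).map
    (fun t => PySem.List.pyGetD l2m t.2 "")

-- ===== PRECONDITION & SPEC =====
def Spec_get_partial_match (wl : List String) (l2m : List String) (out : List String) : Prop := out = get_partial_match_alt wl l2m
instance (wl : List String) (l2m : List String) (out : List String) : Decidable (Spec_get_partial_match wl l2m out) := by unfold Spec_get_partial_match; infer_instance

-- ===== CLAIM (what is proved, stated in full; the proofs are below) =====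
def Claim_equal_get_partial_match : Prop := ∀ (wl : List String) (l2m : List String), Dom_get_partial_match wl l2m → Spec_get_partial_match wl l2m (get_partial_match wl l2m)

-- ===== LEMMAS AND PROOFS =====

-- the C-gram of wl starting at i (proof-side abbreviation)
def gramOf (wl : List String) (C i : Int) : String :=
  PySem.Str.join " " (PySem.List.slice wl (some i) (some (i + C)))

theorem ngram_eq (C : Int) (wl : List String) :
    ngram C wl = (PySem.List.pyRange 0 ((wl.length : Int) - C + 1) 1).map (gramOf wl C) := by
  unfold ngram
  rw [PySem.List.foldl_append_singleton_eq_map]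
  rfl

-- A as a flatMap of filters
theorem A_eq (wl l2m : List String) :
    get_partial_match wl l2m =
      (PySem.List.pyRange (wl.length : Int) 0 (-1)).flatMap
        (fun C => l2m.filter (fun s => decide (s ∈ ngram C wl))) := by
  unfold get_partial_match
  simp only [PySem.List.foldl_append_ite_eq_filter, PySem.List.foldl_append_eq_flatMap,
    List.nil_append]

-- inner dict-building loop over a Nodup list of grams: only the key s gains the entry C
theorem inner_fold (gs : List String) (hnd : gs.Nodup) (C : Int)
    (d : PySem.Dict String (List Int)) (s : String) :
    (gs.foldl (fun d g => d.insert g (d.getD g [] ++ [C])) d).getD s [] =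
      d.getD s [] ++ (if s ∈ gs then [C] else []) := by
  induction gs generalizing d with
  | nil => simp
  | cons g t ih =>
    rcases List.nodup_cons.mp hnd with ⟨hgt, hnt⟩
    rw [List.foldl_cons, ih hnt, PySem.Dict.getD_insert]
    by_cases hsg : s = g
    · subst hsg
      simp [hgt]
    · simp [hsg]

-- the index fold over lengths 1..m, from an arbitrary dict
theorem lengths_aux (wl : List String) (m : Nat) (d : PySem.Dict String (List Int)) (s : String) :
    ((PySem.List.pyRange 1 (1 + (m : Int)) 1).foldl
      (fun d C =>
        (PySem.Set.ofList ((PySem.List.pyRange 0 ((wl.length : Int) - C + 1) 1).map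
            (fun i => PySem.Str.join " " (PySem.List.slice wl (some i) (some (i + C)))))).foldl
          (fun d g => d.insert g (d.getD g [] ++ [C])) d) d).getD s [] =
    d.getD s [] ++
      (PySem.List.pyRange 1 (1 + (m : Int)) 1).filter (fun C => decide (s ∈ ngram C wl)) := by
  induction m generalizing d with
  | zero => simp [PySem.List.pyRange_one_eq_nil]
  | succ k ih =>
    have hcast : (1 + ((k + 1 : Nat) : Int)) = (1 + (k : Int)) + 1 := by push_cast; ring
    rw [hcast, PySem.List.pyRange_one_succ_right (by omega : (1:Int) ≤ 1 + k),
      List.foldl_append, List.filter_append, List.foldl_cons, List.foldl_nil,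
      inner_fold _ (PySem.Set.nodup_ofList _) _ _ s, ih]
    have hmem : (s ∈ PySem.Set.ofList ((PySem.List.pyRange 0 ((wl.length : Int) - (1 + (k:Int)) + 1) 1).map
        (fun i => PySem.Str.join " " (PySem.List.slice wl (some i) (some (i + (1 + (k:Int)))))))) ↔
        s ∈ ngram (1 + (k:Int)) wl := by
      rw [PySem.Set.mem_ofList, ngram_eq]
      rfl
    by_cases hs : s ∈ ngram (1 + (k:Int)) wl
    · simp [hmem, hs]
    · simp [hmem, hs]

-- the index maps s to the ascending list of lengths C at which s is a C-gram of wl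
theorem lengths_getD (wl : List String) (s : String) :
    ((PySem.List.pyRange 1 ((wl.length : Int) + 1) 1).foldl
      (fun d C =>
        (PySem.Set.ofList ((PySem.List.pyRange 0 ((wl.length : Int) - C + 1) 1).map
            (fun i => PySem.Str.join " " (PySem.List.slice wl (some i) (some (i + C)))))).foldl
          (fun d g => d.insert g (d.getD g [] ++ [C])) d)
      PySem.Dict.empty).getD s [] =
    (PySem.List.pyRange 1 ((wl.length : Int) + 1) 1).filter
      (fun C => decide (s ∈ ngram C wl)) := by
  have h := lengths_aux wl wl.length PySem.Dict.empty s
  rw [show (1 + ((wl.length : Nat) : Int)) = (wl.length : Int) + 1 by ring] at h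
  simpa using h

-- (filter then map) as flatMap producing zero-or-one element
theorem filter_map_eq_flatMap {α β : Type} (l : List α) (p : α → Bool) (f : α → β) :
    (l.filter p).map f = l.flatMap (fun x => if p x then [f x] else []) := by
  induction l with
  | nil => simp
  | cons x t ih => by_cases h : p x <;> simp [h, ih]

-- swapping a double flatMap is a permutation
theorem flatMap_comm_perm {α β γ : Type} (l1 : List α) (l2 : List β) (f : α → β → List γ) :
    (l1.flatMap fun a => l2.flatMap fun b => f a b).Perm
      (l2.flatMap fun b => l1.flatMap fun a => f a b) := by
  rw [← Multiset.coe_eq_coe]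
  simp only [← Multiset.coe_bind]
  exact Multiset.bind_bind _ _

-- A's annotated match list: (−C, position) in A's emission order
def Aitems (wl l2m : List String) : List (Int × Int) :=
  (PySem.List.pyRange (wl.length : Int) 0 (-1)).flatMap
    (fun C => ((PySem.List.enumerate l2m).filter (fun p => decide (p.2 ∈ ngram C wl))).map
      (fun p => (-C, p.1)))

theorem items_perm (wl l2m : List String) :
    ((PySem.List.enumerate l2m).flatMap
      (fun p => (((PySem.List.pyRange 1 ((wl.length : Int) + 1) 1).filter
          (fun C => decide (p.2 ∈ ngram C wl))).map (fun C => (-C, p.1))))).Perm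
      (Aitems wl l2m) := by
  unfold Aitems
  have h1 : ∀ p : Int × String,
      (((PySem.List.pyRange 1 ((wl.length : Int) + 1) 1).filter
          (fun C => decide (p.2 ∈ ngram C wl))).map (fun C => ((-C, p.1) : Int × Int))) =
        (PySem.List.pyRange 1 ((wl.length : Int) + 1) 1).flatMap
          (fun C => if decide (p.2 ∈ ngram C wl) then [((-C, p.1) : Int × Int)] else []) := by
    intro p; exact filter_map_eq_flatMap _ _ _
  have h2 : ∀ C : Int,
      (((PySem.List.enumerate l2m).filter (fun p => decide (p.2 ∈ ngram C wl))).map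
          (fun p => ((-C, p.1) : Int × Int))) =
        (PySem.List.enumerate l2m).flatMap
          (fun p => if decide (p.2 ∈ ngram C wl) then [((-C, p.1) : Int × Int)] else []) := by
    intro C; exact filter_map_eq_flatMap _ _ _
  simp only [h1, h2]
  refine (flatMap_comm_perm _ _ _).trans ?_
  have hrev : PySem.List.pyRange (wl.length : Int) 0 (-1) =
      (PySem.List.pyRange 1 ((wl.length : Int) + 1) 1).reverse := by
    rw [PySem.List.pyRange_neg_one_eq_reverse]
    norm_num
  rw [hrev]
  exact (List.Perm.flatMap_right _ (List.reverse_perm _).symm)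

theorem Aitems_pairwise (wl l2m : List String) :
    (Aitems wl l2m).Pairwise
      (fun a b => toLex (a : Int × Int) < toLex (b : Int × Int)) := by
  unfold Aitems
  rw [List.flatMap_def, List.pairwise_flatten]
  constructor
  · intro l' hl'
    rcases List.mem_map.mp hl' with ⟨C, _, rfl⟩
    rw [List.pairwise_map]
    refine ((PySem.List.pairwise_lt_enumerate l2m 0).filter _).imp ?_
    intro p q h
    exact Prod.Lex.toLex_lt_toLex.mpr (Or.inr ⟨rfl, h⟩)
  · rw [List.pairwise_map]
    have houter : (PySem.List.pyRange (wl.length : Int) 0 (-1)).Pairwise (fun a b => b < a) := by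
      rw [PySem.List.pyRange_neg_one_eq_reverse, List.pairwise_reverse]
      exact PySem.List.pairwise_lt_pyRange_one _ _
    refine houter.imp ?_
    intro C1 C2 h x hx y hy
    rcases List.mem_map.mp hx with ⟨p, _, rfl⟩
    rcases List.mem_map.mp hy with ⟨q, _, rfl⟩
    exact Prod.Lex.toLex_lt_toLex.mpr (Or.inl (by omega))

theorem sorted2_eq_sorted_lex (xs : List (Int × Int)) :
    PySem.List.sorted2 xs (fun t => t.1) (fun t => t.2) false =
      PySem.List.sorted xs (fun t => toLex t) false := by
  rw [PySem.List.sorted_eq_foldl_insertBy]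
  show List.foldl (fun acc x => PySem.List.insertBy
      (fun a b => decide (a.1 < b.1) || (!decide (b.1 < a.1) && decide (a.2 < b.2))) x acc) [] xs = _
  congr 1
  funext acc x
  congr 1
  funext a b
  rcases lt_trichotomy a.1 b.1 with h|h|h <;>
    simp [Prod.Lex.toLex_lt_toLex, h, not_lt_of_gt]

-- each admitted enumerate entry indexes its own element
theorem enum_getD (l2m : List String) : ∀ p ∈ PySem.List.enumerate l2m,
    PySem.List.pyGetD l2m p.1 "" = p.2 := by
  intro p hp
  rcases (PySem.List.mem_enumerate_iff _ _ _).mp hp with ⟨k, hk, rfl⟩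
  simp [PySem.List.pyGetD_natCast, hk]

theorem filter_enum_map_snd (q : String → Bool) (l : List String) : ∀ s : Int,
    ((PySem.List.enumerate l s).filter (fun p => q p.2)).map (fun p => p.2) = l.filter q := by
  induction l with
  | nil => intro s; simp
  | cons x t ih =>
    intro s
    rw [PySem.List.enumerate_cons]
    by_cases h : q x <;> simp [h, ih]

theorem map_Aitems (wl l2m : List String) :
    (Aitems wl l2m).map (fun t => PySem.List.pyGetD l2m t.2 "") =
      (PySem.List.pyRange (wl.length : Int) 0 (-1)).flatMap
        (fun C => l2m.filter (fun s => decide (s ∈ ngram C wl))) := by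
  unfold Aitems
  rw [List.map_flatMap]
  congr 1
  funext C
  rw [List.map_map]
  have h1 : List.map ((fun t : Int × Int => PySem.List.pyGetD l2m t.2 "") ∘ fun p : Int × String => (-C, p.1))
      ((PySem.List.enumerate l2m).filter (fun p => decide (p.2 ∈ ngram C wl))) =
      List.map (fun p : Int × String => p.2)
      ((PySem.List.enumerate l2m).filter (fun p => decide (p.2 ∈ ngram C wl))) :=
    List.map_congr_left (fun p hp => enum_getD l2m p (List.mem_of_mem_filter hp))
  rw [h1]
  exact filter_enum_map_snd (fun s => decide (s ∈ ngram C wl)) l2m 0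

theorem B_eq (wl l2m : List String) :
    get_partial_match_alt wl l2m =
      (PySem.List.sorted2 ((PySem.List.enumerate l2m).flatMap (fun p =>
          (((PySem.List.pyRange 1 ((wl.length : Int) + 1) 1).filter
            (fun C => decide (p.2 ∈ ngram C wl))).map (fun C => (-C, p.1)))))
        (fun t => t.1) (fun t => t.2) false).map (fun t => PySem.List.pyGetD l2m t.2 "") := by
  unfold get_partial_match_alt
  simp only [lengths_getD]

-- ===== VERDICT (by name: the statement is the Claim_ definition above) =====
theorem get_partial_match_spec : Claim_equal_get_partial_match := by
  intro wl l2m _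
  unfold Spec_get_partial_match
  rw [A_eq, ← map_Aitems, B_eq, sorted2_eq_sorted_lex,
    PySem.List.sorted_eq_of_perm_of_pairwise_lt _ _ _ (items_perm wl l2m).symm
      (Aitems_pairwise wl l2m)]
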